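-- pv_equiv track=rewrite | github.com/sbhooley/ainativelang | langserver.py | _strip_json_line_comments
-- ===== SOURCE A (Python) =====
-- from typing import Any, Dict, Iterable, List, Optional, Sequence, Set, Tuple
--
-- def _strip_json_line_comments(raw: str) -> str:
--     # Keep this conservative: remove // only outside quoted strings.
--     out: List[str] = []
--     i = 0
--     in_q = False
--     esc = False
--     while i < len(raw):
--         ch = raw[i]
--         if in_q:
--             out.append(ch)
--             if esc:
--                 esc = False
--             elif ch == "\\":
--                 esc = True
--             elif ch == '"':
--                 in_q = False
--             i += 1
--             continue
--         if ch == '"':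
--             in_q = True
--             out.append(ch)
--             i += 1
--             continue
--         if ch == "/" and i + 1 < len(raw) and raw[i + 1] == "/":
--             # Skip to line end.
--             while i < len(raw) and raw[i] not in "\r\n":
--                 i += 1
--             continue
--         out.append(ch)
--         i += 1
--     return "".join(out)
-- ===== SOURCE B (Python) =====
-- def _strip_json_line_comments(raw: str) -> str:
--     # Tokenizer: consume a whole quoted string or a whole // comment per step,
--     # instead of a char-by-char state machine with in_q/esc flags.
--     n = len(raw)
--
--     def string_end(j: int) -> int:
--         # j is just past the opening quote; return index just past the closing
--         # quote, or n if the string is unterminated.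
--         while j < n:
--             if raw[j] == "\\":
--                 j += 2
--             elif raw[j] == '"':
--                 return j + 1
--             else:
--                 j += 1
--         return n
--
--     def line_end(j: int) -> int:
--         while j < n and raw[j] not in "\r\n":
--             j += 1
--         return j
--
--     out = []
--     i = 0
--     while i < n:
--         c = raw[i]
--         if c == '"':
--             j = string_end(i + 1)
--             out.append(raw[i:j])
--             i = j
--         elif c == "/" and i + 1 < n and raw[i + 1] == "/":
--             i = line_end(i)
--         else:
--             out.append(c)
--             i += 1
--     return "".join(out)
-- ===== Notes on version B (the rewrite author's own statement) =====
-- stated objective: alternative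
-- what changed: Replaced A's char-by-char state machine with in_q/esc flags carried across iterations by a tokenizer that consumes a whole quoted string (via a string_end scanner handling escapes) or a whole // comment in one step and appends slices.
import Mathlib
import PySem

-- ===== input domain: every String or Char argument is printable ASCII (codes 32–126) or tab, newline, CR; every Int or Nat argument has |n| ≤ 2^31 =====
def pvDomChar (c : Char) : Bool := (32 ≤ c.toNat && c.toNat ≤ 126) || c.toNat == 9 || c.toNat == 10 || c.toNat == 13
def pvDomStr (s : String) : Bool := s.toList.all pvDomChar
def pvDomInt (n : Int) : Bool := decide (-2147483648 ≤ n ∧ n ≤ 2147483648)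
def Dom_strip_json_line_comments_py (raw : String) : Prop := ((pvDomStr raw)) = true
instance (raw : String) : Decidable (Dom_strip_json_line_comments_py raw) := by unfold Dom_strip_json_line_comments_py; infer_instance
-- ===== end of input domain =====

-- B replaces A's char-by-char state machine (in_q/esc flags) by a tokenizer consuming whole
-- string/comment tokens per step (objective: alternative decomposition, same O(n) cost).
-- Loops are transliterated with a step-count fuel (s.length steps always suffice, each
-- iteration advances the index by at least one; proved below via the bridge lemmas).

-- ===== PORT A =====
-- inner `while i < len(raw) and raw[i] not in "\r\n": i += 1` of A
def stripA_skip (s : List Char) : Nat → Nat → Nat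
  | 0, i => i
  | fuel+1, i =>
    if h : i < s.length then
      if s[i] ≠ '\r' ∧ s[i] ≠ '\n' then stripA_skip s fuel (i+1) else i
    else i

def stripA_loop (s : List Char) : Nat → Nat → Bool → Bool → List Char → String
  | 0, _, _, _, out => String.ofList out
  | fuel+1, i, in_q, esc, out =>
    if h : i < s.length then
      if in_q then
        if esc then stripA_loop s fuel (i+1) true false (out ++ [s[i]])
        else if s[i] = '\\' then stripA_loop s fuel (i+1) true true (out ++ [s[i]])
        else if s[i] = '"' then stripA_loop s fuel (i+1) false esc (out ++ [s[i]])
        else stripA_loop s fuel (i+1) true esc (out ++ [s[i]])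
      else if s[i] = '"' then stripA_loop s fuel (i+1) true esc (out ++ [s[i]])
      else if s[i] = '/' ∧ i+1 < s.length ∧ s.getD (i+1) ' ' = '/' then
        stripA_loop s fuel (stripA_skip s s.length i) in_q esc out
      else stripA_loop s fuel (i+1) in_q esc (out ++ [s[i]])
    else String.ofList out

def strip_json_line_comments_py (raw : String) : String :=
  stripA_loop raw.toList raw.toList.length 0 false false []

-- ===== PORT B =====
-- `string_end` of B: scan past a quoted string body (j is just past the opening quote)
def stripB_strEnd (s : List Char) : Nat → Nat → Nat
  | 0, _ => s.length
  | fuel+1, j =>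
    if h : j < s.length then
      if s[j] = '\\' then stripB_strEnd s fuel (j+2)
      else if s[j] = '"' then j+1
      else stripB_strEnd s fuel (j+1)
    else s.length

-- `line_end` of B
def stripB_lineEnd (s : List Char) : Nat → Nat → Nat
  | 0, j => j
  | fuel+1, j =>
    if h : j < s.length then
      if s[j] ≠ '\r' ∧ s[j] ≠ '\n' then stripB_lineEnd s fuel (j+1) else j
    else j

def stripB_loop (s : List Char) : Nat → Nat → List Char → String
  | 0, _, out => String.ofList out
  | fuel+1, i, out =>
    if h : i < s.length then
      if s[i] = '"' then
        stripB_loop s fuel (stripB_strEnd s s.length (i+1))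
          (out ++ (s.take (stripB_strEnd s s.length (i+1))).drop i)
      else if s[i] = '/' ∧ i+1 < s.length ∧ s.getD (i+1) ' ' = '/' then
        stripB_loop s fuel (stripB_lineEnd s s.length i) out
      else stripB_loop s fuel (i+1) (out ++ [s[i]])
    else String.ofList out

def strip_json_line_comments_py_alt (raw : String) : String :=
  stripB_loop raw.toList raw.toList.length 0 []

-- ===== PRECONDITION & SPEC =====
def Spec_strip_json_line_comments_py (raw : String) (out : String) : Prop := out = strip_json_line_comments_py_alt raw
instance (raw : String) (out : String) : Decidable (Spec_strip_json_line_comments_py raw out) := by unfold Spec_strip_json_line_comments_py; infer_instance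

-- ===== CLAIM (what is proved, stated in full; the proofs are below) =====
def Claim_equal_strip_json_line_comments_py : Prop := ∀ (raw : String), Dom_strip_json_line_comments_py raw → Spec_strip_json_line_comments_py raw (strip_json_line_comments_py raw)

-- ===== LEMMAS AND PROOFS =====

-- Fuel-free (well-founded) restatements of the four loops, used only by the proofs.
def stripA_skipW (s : List Char) (i : Nat) : Nat :=
  if h : i < s.length then
    if s[i] ≠ '\r' ∧ s[i] ≠ '\n' then stripA_skipW s (i+1) else i
  else i
termination_by s.length - i

theorem stripA_skipW_ge (s : List Char) (i : Nat) : i ≤ stripA_skipW s i := by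
  fun_induction stripA_skipW s i with
  | case1 i h hc ih => omega
  | case2 i h hc => omega
  | case3 i h => omega

def stripA_loopW (s : List Char) (i : Nat) (in_q esc : Bool) (out : List Char) : String :=
  if h : i < s.length then
    if in_q then
      if esc then stripA_loopW s (i+1) true false (out ++ [s[i]])
      else if s[i] = '\\' then stripA_loopW s (i+1) true true (out ++ [s[i]])
      else if s[i] = '"' then stripA_loopW s (i+1) false esc (out ++ [s[i]])
      else stripA_loopW s (i+1) true esc (out ++ [s[i]])
    else if s[i] = '"' then stripA_loopW s (i+1) true esc (out ++ [s[i]])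
    else if s[i] = '/' ∧ i+1 < s.length ∧ s.getD (i+1) ' ' = '/' then
      stripA_loopW s (stripA_skipW s i) in_q esc out
    else stripA_loopW s (i+1) in_q esc (out ++ [s[i]])
  else String.ofList out
termination_by s.length - i
decreasing_by
  · omega
  · omega
  · omega
  · omega
  · omega
  · have h1 : stripA_skipW s i = stripA_skipW s (i+1) := by
      rw [stripA_skipW]; rw [dif_pos h, if_pos ?side]
      case side =>
        rename_i hc
        refine ⟨?_, ?_⟩ <;> (intro he; rw [he] at hc; exact absurd hc.1 (by decide))
    have h2 := stripA_skipW_ge s (i+1)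
    omega
  · omega

def stripB_strEndW (s : List Char) (j : Nat) : Nat :=
  if h : j < s.length then
    if s[j] = '\\' then stripB_strEndW s (j+2)
    else if s[j] = '"' then j+1
    else stripB_strEndW s (j+1)
  else s.length
termination_by s.length - j

theorem stripB_strEndW_ge (s : List Char) (j : Nat) (hj : j ≤ s.length) : j ≤ stripB_strEndW s j := by
  fun_induction stripB_strEndW s j with
  | case1 j h hc ih =>
    by_cases h2 : j + 2 ≤ s.length
    · have := ih h2; omega
    · have hlt : ¬ j + 2 < s.length := by omega
      rw [stripB_strEndW, dif_neg hlt]; omega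
  | case2 j h hc hc2 => omega
  | case3 j h hc hc2 ih => have := ih (by omega); omega
  | case4 j h => omega

def stripB_lineEndW (s : List Char) (j : Nat) : Nat :=
  if h : j < s.length then
    if s[j] ≠ '\r' ∧ s[j] ≠ '\n' then stripB_lineEndW s (j+1) else j
  else j
termination_by s.length - j

theorem stripB_lineEndW_ge (s : List Char) (j : Nat) : j ≤ stripB_lineEndW s j := by
  fun_induction stripB_lineEndW s j with
  | case1 j h hc ih => omega
  | case2 j h hc => omega
  | case3 j h => omega

def stripB_loopW (s : List Char) (i : Nat) (out : List Char) : String :=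
  if h : i < s.length then
    if s[i] = '"' then
      stripB_loopW s (stripB_strEndW s (i+1)) (out ++ (s.take (stripB_strEndW s (i+1))).drop i)
    else if s[i] = '/' ∧ i+1 < s.length ∧ s.getD (i+1) ' ' = '/' then
      stripB_loopW s (stripB_lineEndW s i) out
    else stripB_loopW s (i+1) (out ++ [s[i]])
  else String.ofList out
termination_by s.length - i
decreasing_by
  · have h1 := stripB_strEndW_ge s (i+1) (by omega)
    omega
  · have h1 : stripB_lineEndW s i = stripB_lineEndW s (i+1) := by
      rw [stripB_lineEndW]; rw [dif_pos h, if_pos ?side]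
      case side =>
        rename_i hc
        refine ⟨?_, ?_⟩ <;> (intro he; rw [he] at hc; exact absurd hc.1 (by decide))
    have h2 := stripB_lineEndW_ge s (i+1)
    omega
  · omega

-- ---- bridges: the fueled ports equal the fuel-free versions when fuel ≥ remaining length ----

theorem skipA_bridge (s : List Char) : ∀ (f i : Nat), s.length - i ≤ f →
    stripA_skip s f i = stripA_skipW s i := by
  intro f
  induction f with
  | zero =>
    intro i hle
    have hi : ¬ i < s.length := by omega
    rw [stripA_skip, stripA_skipW, dif_neg hi]
  | succ f ih =>
    intro i hle
    rw [stripA_skip, stripA_skipW]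
    by_cases h : i < s.length
    · rw [dif_pos h, dif_pos h]
      by_cases hc : s[i] ≠ '\r' ∧ s[i] ≠ '\n'
      · rw [if_pos hc, if_pos hc]; exact ih (i+1) (by omega)
      · rw [if_neg hc, if_neg hc]
    · rw [dif_neg h, dif_neg h]

theorem strEndB_bridge (s : List Char) : ∀ (f j : Nat), s.length - j ≤ f →
    stripB_strEnd s f j = stripB_strEndW s j := by
  intro f
  induction f with
  | zero =>
    intro j hle
    have hj : ¬ j < s.length := by omega
    rw [stripB_strEnd, stripB_strEndW, dif_neg hj]
  | succ f ih =>
    intro j hle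
    rw [stripB_strEnd, stripB_strEndW]
    by_cases h : j < s.length
    · rw [dif_pos h, dif_pos h]
      by_cases hb : s[j] = '\\'
      · rw [if_pos hb, if_pos hb]; exact ih (j+2) (by omega)
      · rw [if_neg hb, if_neg hb]
        by_cases hq : s[j] = '"'
        · rw [if_pos hq, if_pos hq]
        · rw [if_neg hq, if_neg hq]; exact ih (j+1) (by omega)
    · rw [dif_neg h, dif_neg h]

theorem lineEndB_bridge (s : List Char) : ∀ (f j : Nat), s.length - j ≤ f →
    stripB_lineEnd s f j = stripB_lineEndW s j := by
  intro f
  induction f with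
  | zero =>
    intro j hle
    have hj : ¬ j < s.length := by omega
    rw [stripB_lineEnd, stripB_lineEndW, dif_neg hj]
  | succ f ih =>
    intro j hle
    rw [stripB_lineEnd, stripB_lineEndW]
    by_cases h : j < s.length
    · rw [dif_pos h, dif_pos h]
      by_cases hc : s[j] ≠ '\r' ∧ s[j] ≠ '\n'
      · rw [if_pos hc, if_pos hc]; exact ih (j+1) (by omega)
      · rw [if_neg hc, if_neg hc]
    · rw [dif_neg h, dif_neg h]

theorem loopA_bridge (s : List Char) : ∀ (f i : Nat) (in_q esc : Bool) (out : List Char),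
    s.length - i ≤ f → stripA_loop s f i in_q esc out = stripA_loopW s i in_q esc out := by
  intro f
  induction f with
  | zero =>
    intro i in_q esc out hle
    have hi : ¬ i < s.length := by omega
    rw [stripA_loop, stripA_loopW, dif_neg hi]
  | succ f ih =>
    intro i in_q esc out hle
    rw [stripA_loop, stripA_loopW]
    by_cases h : i < s.length
    · rw [dif_pos h, dif_pos h]
      cases in_q with
      | true =>
        rw [if_pos rfl, if_pos rfl]
        cases esc with
        | true =>
          rw [if_pos rfl, if_pos rfl]; exact ih (i+1) true false _ (by omega)
        | false =>
          rw [if_neg (by decide : ¬ (false = true)), if_neg (by decide : ¬ (false = true))]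
          by_cases hb : s[i] = '\\'
          · rw [if_pos hb, if_pos hb]; exact ih (i+1) true true _ (by omega)
          · rw [if_neg hb, if_neg hb]
            by_cases hq : s[i] = '"'
            · rw [if_pos hq, if_pos hq]; exact ih (i+1) false false _ (by omega)
            · rw [if_neg hq, if_neg hq]; exact ih (i+1) true false _ (by omega)
      | false =>
        rw [if_neg (by decide : ¬ (false = true)), if_neg (by decide : ¬ (false = true))]
        by_cases hq : s[i] = '"'
        · rw [if_pos hq, if_pos hq]; exact ih (i+1) true esc _ (by omega)
        · rw [if_neg hq, if_neg hq]
          by_cases hc : s[i] = '/' ∧ i+1 < s.length ∧ s.getD (i+1) ' ' = '/'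
          · rw [if_pos hc, if_pos hc,
                skipA_bridge s s.length i (by omega)]
            have h1 : stripA_skipW s i = stripA_skipW s (i+1) := by
              rw [stripA_skipW]; rw [dif_pos h, if_pos ?side]
              case side =>
                refine ⟨?_, ?_⟩ <;> (intro he; rw [he] at hc; exact absurd hc.1 (by decide))
            have h2 := stripA_skipW_ge s (i+1)
            exact ih (stripA_skipW s i) false esc out (by omega)
          · rw [if_neg hc, if_neg hc]; exact ih (i+1) false esc _ (by omega)
    · rw [dif_neg h, dif_neg h]

theorem loopB_bridge (s : List Char) : ∀ (f i : Nat) (out : List Char),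
    s.length - i ≤ f → stripB_loop s f i out = stripB_loopW s i out := by
  intro f
  induction f with
  | zero =>
    intro i out hle
    have hi : ¬ i < s.length := by omega
    rw [stripB_loop, stripB_loopW, dif_neg hi]
  | succ f ih =>
    intro i out hle
    rw [stripB_loop, stripB_loopW]
    by_cases h : i < s.length
    · rw [dif_pos h, dif_pos h]
      by_cases hq : s[i] = '"'
      · rw [if_pos hq, if_pos hq, strEndB_bridge s s.length (i+1) (by omega)]
        have h2 := stripB_strEndW_ge s (i+1) (by omega)
        exact ih (stripB_strEndW s (i+1)) _ (by omega)
      · rw [if_neg hq, if_neg hq]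
        by_cases hc : s[i] = '/' ∧ i+1 < s.length ∧ s.getD (i+1) ' ' = '/'
        · rw [if_pos hc, if_pos hc, lineEndB_bridge s s.length i (by omega)]
          have h1 : stripB_lineEndW s i = stripB_lineEndW s (i+1) := by
            rw [stripB_lineEndW]; rw [dif_pos h, if_pos ?side]
            case side =>
              refine ⟨?_, ?_⟩ <;> (intro he; rw [he] at hc; exact absurd hc.1 (by decide))
          have h2 := stripB_lineEndW_ge s (i+1)
          exact ih (stripB_lineEndW s i) out (by omega)
        · rw [if_neg hc, if_neg hc]; exact ih (i+1) _ (by omega)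
    · rw [dif_neg h, dif_neg h]

-- ---- A's skip scanner and B's line_end are the same function ----
theorem skip_eq_lineEnd (s : List Char) (i : Nat) : stripA_skipW s i = stripB_lineEndW s i := by
  fun_induction stripA_skipW s i with
  | case1 i h hc ih => rw [stripB_lineEndW, dif_pos h, if_pos hc]; exact ih
  | case2 i h hc => rw [stripB_lineEndW, dif_pos h, if_neg hc]
  | case3 i h => rw [stripB_lineEndW, dif_neg h]

-- A's in-string scanning from position j (in_q = true, esc = false) equals jumping to
-- B's string_end and emitting the scanned slice in one piece.
theorem stringQ (s : List Char) : ∀ (n j : Nat) (out : List Char), s.length - j ≤ n →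
    stripA_loopW s j true false out =
      stripA_loopW s (stripB_strEndW s j) false false (out ++ (s.take (stripB_strEndW s j)).drop j) := by
  intro n
  induction n with
  | zero =>
    intro j out hle
    have hj : ¬ j < s.length := by omega
    rw [stripA_loopW, dif_neg hj, stripB_strEndW, dif_neg hj,
        stripA_loopW, dif_neg (by omega : ¬ s.length < s.length),
        List.take_length, List.drop_eq_nil_of_le (by omega), List.append_nil]
  | succ n ih =>
    intro j out hle
    by_cases h : j < s.length
    · rw [stripA_loopW, dif_pos h, if_pos rfl, if_neg (by decide : ¬ (false = true))]
      by_cases hb : s[j] = '\\'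
      · -- escape: A consumes s[j] then (if any) s[j+1]
        rw [if_pos hb, stripB_strEndW, dif_pos h, if_pos hb]
        by_cases h2 : j + 1 < s.length
        · rw [stripA_loopW, dif_pos h2, if_pos rfl, if_pos rfl,
              (by rfl : j + 1 + 1 = j + 2),
              ih (j+2) (out ++ [s[j]] ++ [s[j+1]]) (by omega)]
          congr 1
          have he2 : j + 2 ≤ stripB_strEndW s (j+2) := stripB_strEndW_ge s (j+2) (by omega)
          have hl1 : j < (s.take (stripB_strEndW s (j+2))).length := by
            simp only [List.length_take]; omega
          have hl2 : j + 1 < (s.take (stripB_strEndW s (j+2))).length := by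
            simp only [List.length_take]; omega
          rw [List.drop_eq_getElem_cons hl1, List.drop_eq_getElem_cons hl2]
          simp only [List.getElem_take]
          simp
        · -- backslash is the last char
          have h3 : ¬ j + 2 < s.length := by omega
          rw [stripA_loopW, dif_neg h2, stripB_strEndW, dif_neg h3,
              stripA_loopW, dif_neg (by omega : ¬ s.length < s.length), List.take_length,
              List.drop_eq_getElem_cons h, List.drop_eq_nil_of_le (by omega)]
      · by_cases hq : s[j] = '"'
        · -- closing quote
          rw [if_neg hb, if_pos hq, stripB_strEndW, dif_pos h, if_neg hb, if_pos hq]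
          congr 1
          rw [List.drop_eq_getElem_cons (by simp only [List.length_take]; omega :
                j < (s.take (j+1)).length)]
          simp only [List.getElem_take]
          rw [List.drop_eq_nil_of_le (by simp only [List.length_take]; omega)]
        · -- ordinary char inside string
          rw [if_neg hb, if_neg hq, stripB_strEndW, dif_pos h, if_neg hb, if_neg hq,
              ih (j+1) (out ++ [s[j]]) (by omega)]
          congr 1
          have he2 : j + 1 ≤ stripB_strEndW s (j+1) := stripB_strEndW_ge s (j+1) (by omega)
          rw [List.drop_eq_getElem_cons (by simp only [List.length_take]; omega :
                j < (s.take (stripB_strEndW s (j+1))).length)]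
          simp only [List.getElem_take]
          simp
    · rw [stripA_loopW, dif_neg h, stripB_strEndW, dif_neg h,
          stripA_loopW, dif_neg (by omega : ¬ s.length < s.length),
          List.take_length, List.drop_eq_nil_of_le (by omega), List.append_nil]

-- main loop equivalence (outside strings, A's flags are false)
theorem loop_eq (s : List Char) : ∀ (n i : Nat) (out : List Char), s.length - i ≤ n →
    stripA_loopW s i false false out = stripB_loopW s i out := by
  intro n
  induction n with
  | zero =>
    intro i out hle
    have hi : ¬ i < s.length := by omega
    rw [stripA_loopW, dif_neg hi, stripB_loopW, dif_neg hi]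
  | succ n ih =>
    intro i out hle
    rw [stripA_loopW, stripB_loopW]
    by_cases h : i < s.length
    · rw [dif_pos h, dif_pos h, if_neg (by decide : ¬ (false = true))]
      by_cases hq : s[i] = '"'
      · rw [if_pos hq, if_pos hq,
            stringQ s s.length (i+1) (out ++ [s[i]]) (by omega)]
        have he2 : i + 1 ≤ stripB_strEndW s (i+1) := stripB_strEndW_ge s (i+1) (by omega)
        rw [ih (stripB_strEndW s (i+1)) _ (by omega)]
        congr 1
        rw [List.drop_eq_getElem_cons (by simp only [List.length_take]; omega :
              i < (s.take (stripB_strEndW s (i+1))).length)]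
        simp only [List.getElem_take]
        simp
      · rw [if_neg hq, if_neg hq]
        by_cases hc : s[i] = '/' ∧ i+1 < s.length ∧ s.getD (i+1) ' ' = '/'
        · rw [if_pos hc, if_pos hc, ← skip_eq_lineEnd]
          have h1 : stripA_skipW s i = stripA_skipW s (i+1) := by
            rw [stripA_skipW, dif_pos h, if_pos ?side]
            case side =>
              refine ⟨?_, ?_⟩ <;> (intro he; rw [he] at hc; exact absurd hc.1 (by decide))
          have h2 := stripA_skipW_ge s (i+1)
          exact ih (stripA_skipW s i) out (by omega)
        · rw [if_neg hc, if_neg hc]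
          exact ih (i+1) _ (by omega)
    · rw [dif_neg h, dif_neg h]

-- ===== VERDICT (by name: the statement is the Claim_ definition above) =====
theorem strip_json_line_comments_py_spec : Claim_equal_strip_json_line_comments_py := by
  intro raw _
  unfold Spec_strip_json_line_comments_py strip_json_line_comments_py strip_json_line_comments_py_alt
  rw [loopA_bridge raw.toList raw.toList.length 0 false false [] (by omega),
      loopB_bridge raw.toList raw.toList.length 0 [] (by omega)]
  exact loop_eq raw.toList raw.toList.length 0 [] (by omega)
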